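-- pv_equiv track=rewrite | github.com/BLON333/Book_Scraper | Python Project Folder/google_sheets_sync.py | canonicalize_header_list
-- ===== SOURCE A (Python) =====
-- import os, unicodedata, config
--
-- HEADER_ALIASES = {
--     "Bet ID#": ["bet id#", "bet id", "ticket #", "ticket number", "ticket", "wager #", "wager id"],
--     "Profit/Loss": ["profit/loss", "profit / loss", "p/l", "net", "net profit"],
--     "Date": ["date"],
--     "Start Time": ["start time", "time"],
--     "Event ID": ["event id", "game id", "match id"],
--     "Result": ["result", "status", "outcome"],
-- }
--
-- def _norm(s: str) -> str:
--     if s is None: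
--         return ""
--     s = unicodedata.normalize("NFKC", str(s)).replace("\u200b", "").replace("\xa0", " ")
--     return s.strip()
--
-- def canonicalize_header_list(header_row):
--     rev = {}
--     for canon, variants in HEADER_ALIASES.items():
--         rev[_norm(canon).lower()] = canon
--         for v in variants:
--             rev[_norm(v).lower()] = canon
--     out = []
--     for h in header_row:
--         key = _norm(h).lower()
--         out.append(rev.get(key, _norm(h)))
--     return out
-- ===== SOURCE B (Python) =====
-- import unicodedata
--
-- HEADER_ALIASES = {
--     "Bet ID#": ["bet id#", "bet id", "ticket #", "ticket number", "ticket", "wager #", "wager id"],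
--     "Profit/Loss": ["profit/loss", "profit / loss", "p/l", "net", "net profit"],
--     "Date": ["date"],
--     "Start Time": ["start time", "time"],
--     "Event ID": ["event id", "game id", "match id"],
--     "Result": ["result", "status", "outcome"],
-- }
--
-- def _norm(s: str) -> str:
--     if s is None:
--         return ""
--     s = unicodedata.normalize("NFKC", str(s)).replace("\u200b", "").replace("\xa0", " ")
--     return s.strip()
--
-- def canonicalize_header_list(header_row):
--     out = []
--     for h in header_row:
--         key = _norm(h).lower()
--         for canon, variants in HEADER_ALIASES.items():
--             if key == _norm(canon).lower() or any(key == _norm(v).lower() for v in variants):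
--                 out.append(canon)
--                 break
--         else:
--             out.append(_norm(h))
--     return out
-- ===== Notes on version B (the rewrite author's own statement) =====
-- stated objective: alternative
-- what changed: B drops A's prebuilt reverse-lookup dict and instead, per header, scans the HEADER_ALIASES table in order with a for/else loop, taking the first matching canonical name.
import Mathlib
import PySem

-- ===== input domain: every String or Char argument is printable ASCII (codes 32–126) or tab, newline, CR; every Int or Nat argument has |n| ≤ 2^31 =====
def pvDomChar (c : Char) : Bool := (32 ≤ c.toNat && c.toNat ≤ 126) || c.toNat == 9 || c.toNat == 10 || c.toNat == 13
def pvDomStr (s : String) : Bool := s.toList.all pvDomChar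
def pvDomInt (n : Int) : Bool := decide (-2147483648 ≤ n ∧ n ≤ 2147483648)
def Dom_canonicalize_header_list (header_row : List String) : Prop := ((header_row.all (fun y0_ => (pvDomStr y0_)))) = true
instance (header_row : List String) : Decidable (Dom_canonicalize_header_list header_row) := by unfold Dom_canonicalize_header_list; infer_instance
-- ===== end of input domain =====

-- B replaces A's prebuilt reverse-lookup dict with an in-order scan of the alias table per header (alternative decomposition, same results).


-- ===== PORT A =====
-- module constant HEADER_ALIASES (shared by both ports, as in the Python module)
def pvAliases : List (String × List String) := [
  ("Bet ID#", ["bet id#", "bet id", "ticket #", "ticket number", "ticket", "wager #", "wager id"]),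
  ("Profit/Loss", ["profit/loss", "profit / loss", "p/l", "net", "net profit"]),
  ("Date", ["date"]),
  ("Start Time", ["start time", "time"]),
  ("Event ID", ["event id", "game id", "match id"]),
  ("Result", ["result", "status", "outcome"])]

-- _norm: on the printable-ASCII domain NFKC normalization and the \u200b/\xa0 replacements are the
-- identity, so _norm is exactly str.strip there (exact on the stated ASCII domain).
def pvNorm (s : String) : String := PySem.Str.strip s

def canonicalize_header_list (header_row : List String) : List String :=
  let rev : PySem.Dict String String := pvAliases.foldl (fun rev cv =>
    let rev := rev.insert (PySem.Str.lower (pvNorm cv.1)) cv.1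
    cv.2.foldl (fun rev v => rev.insert (PySem.Str.lower (pvNorm v)) cv.1) rev)
    PySem.Dict.empty
  header_row.foldl (fun out h =>
    out ++ [rev.getD (PySem.Str.lower (pvNorm h)) (pvNorm h)]) []

-- ===== PORT B =====
-- inner for/else of B: first (canon, variants) group whose normalized canon or a normalized
-- variant equals key gives canon; if the scan falls through (Python's else:), the fallback fb
def pvFindCanon (key fb : String) : List (String × List String) → String
  | [] => fb
  | cv :: rest =>
    if key == PySem.Str.lower (pvNorm cv.1) || cv.2.any (fun v => key == PySem.Str.lower (pvNorm v))
    then cv.1 else pvFindCanon key fb rest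

def canonicalize_header_list_alt (header_row : List String) : List String :=
  header_row.map (fun h => pvFindCanon (PySem.Str.lower (pvNorm h)) (pvNorm h) pvAliases)

-- ===== PRECONDITION & SPEC =====
def Spec_canonicalize_header_list (header_row : List String) (out : List String) : Prop := out = canonicalize_header_list_alt header_row
instance (header_row : List String) (out : List String) : Decidable (Spec_canonicalize_header_list header_row out) := by unfold Spec_canonicalize_header_list; infer_instance

-- ===== CLAIM (what is proved, stated in full; the proofs are below) =====
def Claim_equal_canonicalize_header_list : Prop := ∀ (header_row : List String), Dom_canonicalize_header_list header_row → Spec_canonicalize_header_list header_row (canonicalize_header_list header_row)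

-- ===== LEMMAS AND PROOFS =====

-- the reverse dict A builds, as a literal
def pvRev : PySem.Dict String String := PySem.Dict.mk [
  ("bet id#", "Bet ID#"), ("bet id", "Bet ID#"), ("ticket #", "Bet ID#"),
  ("ticket number", "Bet ID#"), ("ticket", "Bet ID#"), ("wager #", "Bet ID#"),
  ("wager id", "Bet ID#"),
  ("profit/loss", "Profit/Loss"), ("profit / loss", "Profit/Loss"), ("p/l", "Profit/Loss"),
  ("net", "Profit/Loss"), ("net profit", "Profit/Loss"),
  ("date", "Date"),
  ("start time", "Start Time"), ("time", "Start Time"),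
  ("event id", "Event ID"), ("game id", "Event ID"), ("match id", "Event ID"),
  ("result", "Result"), ("status", "Result"), ("outcome", "Result")]

set_option maxHeartbeats 4000000 in
set_option maxRecDepth 20000 in
theorem pvRev_eq : (pvAliases.foldl (fun rev cv =>
    let rev := rev.insert (PySem.Str.lower (pvNorm cv.1)) cv.1
    cv.2.foldl (fun rev v => rev.insert (PySem.Str.lower (pvNorm v)) cv.1) rev)
    PySem.Dict.empty) = pvRev := by
  have s0 : (PySem.Dict.empty).insert (PySem.Str.lower (pvNorm "Bet ID#")) "Bet ID#" = PySem.Dict.mk [("bet id#", "Bet ID#")] := by decide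
  have s1 : (PySem.Dict.mk [("bet id#", "Bet ID#")]).insert (PySem.Str.lower (pvNorm "bet id#")) "Bet ID#" = PySem.Dict.mk [("bet id#", "Bet ID#")] := by decide
  have s2 : (PySem.Dict.mk [("bet id#", "Bet ID#")]).insert (PySem.Str.lower (pvNorm "bet id")) "Bet ID#" = PySem.Dict.mk [("bet id#", "Bet ID#"), ("bet id", "Bet ID#")] := by decide
  have s3 : (PySem.Dict.mk [("bet id#", "Bet ID#"), ("bet id", "Bet ID#")]).insert (PySem.Str.lower (pvNorm "ticket #")) "Bet ID#" = PySem.Dict.mk [("bet id#", "Bet ID#"), ("bet id", "Bet ID#"), ("ticket #", "Bet ID#")] := by decide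
  have s4 : (PySem.Dict.mk [("bet id#", "Bet ID#"), ("bet id", "Bet ID#"), ("ticket #", "Bet ID#")]).insert (PySem.Str.lower (pvNorm "ticket number")) "Bet ID#" = PySem.Dict.mk [("bet id#", "Bet ID#"), ("bet id", "Bet ID#"), ("ticket #", "Bet ID#"), ("ticket number", "Bet ID#")] := by decide
  have s5 : (PySem.Dict.mk [("bet id#", "Bet ID#"), ("bet id", "Bet ID#"), ("ticket #", "Bet ID#"), ("ticket number", "Bet ID#")]).insert (PySem.Str.lower (pvNorm "ticket")) "Bet ID#" = PySem.Dict.mk [("bet id#", "Bet ID#"), ("bet id", "Bet ID#"), ("ticket #", "Bet ID#"), ("ticket number", "Bet ID#"), ("ticket", "Bet ID#")] := by decide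
  have s6 : (PySem.Dict.mk [("bet id#", "Bet ID#"), ("bet id", "Bet ID#"), ("ticket #", "Bet ID#"), ("ticket number", "Bet ID#"), ("ticket", "Bet ID#")]).insert (PySem.Str.lower (pvNorm "wager #")) "Bet ID#" = PySem.Dict.mk [("bet id#", "Bet ID#"), ("bet id", "Bet ID#"), ("ticket #", "Bet ID#"), ("ticket number", "Bet ID#"), ("ticket", "Bet ID#"), ("wager #", "Bet ID#")] := by decide
  have s7 : (PySem.Dict.mk [("bet id#", "Bet ID#"), ("bet id", "Bet ID#"), ("ticket #", "Bet ID#"), ("ticket number", "Bet ID#"), ("ticket", "Bet ID#"), ("wager #", "Bet ID#")]).insert (PySem.Str.lower (pvNorm "wager id")) "Bet ID#" = PySem.Dict.mk [("bet id#", "Bet ID#"), ("bet id", "Bet ID#"), ("ticket #", "Bet ID#"), ("ticket number", "Bet ID#"), ("ticket", "Bet ID#"), ("wager #", "Bet ID#"), ("wager id", "Bet ID#")] := by decide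
  have s8 : (PySem.Dict.mk [("bet id#", "Bet ID#"), ("bet id", "Bet ID#"), ("ticket #", "Bet ID#"), ("ticket number", "Bet ID#"), ("ticket", "Bet ID#"), ("wager #", "Bet ID#"), ("wager id", "Bet ID#")]).insert (PySem.Str.lower (pvNorm "Profit/Loss")) "Profit/Loss" = PySem.Dict.mk [("bet id#", "Bet ID#"), ("bet id", "Bet ID#"), ("ticket #", "Bet ID#"), ("ticket number", "Bet ID#"), ("ticket", "Bet ID#"), ("wager #", "Bet ID#"), ("wager id", "Bet ID#"), ("profit/loss", "Profit/Loss")] := by decide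
  have s9 : (PySem.Dict.mk [("bet id#", "Bet ID#"), ("bet id", "Bet ID#"), ("ticket #", "Bet ID#"), ("ticket number", "Bet ID#"), ("ticket", "Bet ID#"), ("wager #", "Bet ID#"), ("wager id", "Bet ID#"), ("profit/loss", "Profit/Loss")]).insert (PySem.Str.lower (pvNorm "profit/loss")) "Profit/Loss" = PySem.Dict.mk [("bet id#", "Bet ID#"), ("bet id", "Bet ID#"), ("ticket #", "Bet ID#"), ("ticket number", "Bet ID#"), ("ticket", "Bet ID#"), ("wager #", "Bet ID#"), ("wager id", "Bet ID#"), ("profit/loss", "Profit/Loss")] := by decide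
  have s10 : (PySem.Dict.mk [("bet id#", "Bet ID#"), ("bet id", "Bet ID#"), ("ticket #", "Bet ID#"), ("ticket number", "Bet ID#"), ("ticket", "Bet ID#"), ("wager #", "Bet ID#"), ("wager id", "Bet ID#"), ("profit/loss", "Profit/Loss")]).insert (PySem.Str.lower (pvNorm "profit / loss")) "Profit/Loss" = PySem.Dict.mk [("bet id#", "Bet ID#"), ("bet id", "Bet ID#"), ("ticket #", "Bet ID#"), ("ticket number", "Bet ID#"), ("ticket", "Bet ID#"), ("wager #", "Bet ID#"), ("wager id", "Bet ID#"), ("profit/loss", "Profit/Loss"), ("profit / loss", "Profit/Loss")] := by decide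
  have s11 : (PySem.Dict.mk [("bet id#", "Bet ID#"), ("bet id", "Bet ID#"), ("ticket #", "Bet ID#"), ("ticket number", "Bet ID#"), ("ticket", "Bet ID#"), ("wager #", "Bet ID#"), ("wager id", "Bet ID#"), ("profit/loss", "Profit/Loss"), ("profit / loss", "Profit/Loss")]).insert (PySem.Str.lower (pvNorm "p/l")) "Profit/Loss" = PySem.Dict.mk [("bet id#", "Bet ID#"), ("bet id", "Bet ID#"), ("ticket #", "Bet ID#"), ("ticket number", "Bet ID#"), ("ticket", "Bet ID#"), ("wager #", "Bet ID#"), ("wager id", "Bet ID#"), ("profit/loss", "Profit/Loss"), ("profit / loss", "Profit/Loss"), ("p/l", "Profit/Loss")] := by decide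
  have s12 : (PySem.Dict.mk [("bet id#", "Bet ID#"), ("bet id", "Bet ID#"), ("ticket #", "Bet ID#"), ("ticket number", "Bet ID#"), ("ticket", "Bet ID#"), ("wager #", "Bet ID#"), ("wager id", "Bet ID#"), ("profit/loss", "Profit/Loss"), ("profit / loss", "Profit/Loss"), ("p/l", "Profit/Loss")]).insert (PySem.Str.lower (pvNorm "net")) "Profit/Loss" = PySem.Dict.mk [("bet id#", "Bet ID#"), ("bet id", "Bet ID#"), ("ticket #", "Bet ID#"), ("ticket number", "Bet ID#"), ("ticket", "Bet ID#"), ("wager #", "Bet ID#"), ("wager id", "Bet ID#"), ("profit/loss", "Profit/Loss"), ("profit / loss", "Profit/Loss"), ("p/l", "Profit/Loss"), ("net", "Profit/Loss")] := by decide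
  have s13 : (PySem.Dict.mk [("bet id#", "Bet ID#"), ("bet id", "Bet ID#"), ("ticket #", "Bet ID#"), ("ticket number", "Bet ID#"), ("ticket", "Bet ID#"), ("wager #", "Bet ID#"), ("wager id", "Bet ID#"), ("profit/loss", "Profit/Loss"), ("profit / loss", "Profit/Loss"), ("p/l", "Profit/Loss"), ("net", "Profit/Loss")]).insert (PySem.Str.lower (pvNorm "net profit")) "Profit/Loss" = PySem.Dict.mk [("bet id#", "Bet ID#"), ("bet id", "Bet ID#"), ("ticket #", "Bet ID#"), ("ticket number", "Bet ID#"), ("ticket", "Bet ID#"), ("wager #", "Bet ID#"), ("wager id", "Bet ID#"), ("profit/loss", "Profit/Loss"), ("profit / loss", "Profit/Loss"), ("p/l", "Profit/Loss"), ("net", "Profit/Loss"), ("net profit", "Profit/Loss")] := by decide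
  have s14 : (PySem.Dict.mk [("bet id#", "Bet ID#"), ("bet id", "Bet ID#"), ("ticket #", "Bet ID#"), ("ticket number", "Bet ID#"), ("ticket", "Bet ID#"), ("wager #", "Bet ID#"), ("wager id", "Bet ID#"), ("profit/loss", "Profit/Loss"), ("profit / loss", "Profit/Loss"), ("p/l", "Profit/Loss"), ("net", "Profit/Loss"), ("net profit", "Profit/Loss")]).insert (PySem.Str.lower (pvNorm "Date")) "Date" = PySem.Dict.mk [("bet id#", "Bet ID#"), ("bet id", "Bet ID#"), ("ticket #", "Bet ID#"), ("ticket number", "Bet ID#"), ("ticket", "Bet ID#"), ("wager #", "Bet ID#"), ("wager id", "Bet ID#"), ("profit/loss", "Profit/Loss"), ("profit / loss", "Profit/Loss"), ("p/l", "Profit/Loss"), ("net", "Profit/Loss"), ("net profit", "Profit/Loss"), ("date", "Date")] := by decide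
  have s15 : (PySem.Dict.mk [("bet id#", "Bet ID#"), ("bet id", "Bet ID#"), ("ticket #", "Bet ID#"), ("ticket number", "Bet ID#"), ("ticket", "Bet ID#"), ("wager #", "Bet ID#"), ("wager id", "Bet ID#"), ("profit/loss", "Profit/Loss"), ("profit / loss", "Profit/Loss"), ("p/l", "Profit/Loss"), ("net", "Profit/Loss"), ("net profit", "Profit/Loss"), ("date", "Date")]).insert (PySem.Str.lower (pvNorm "date")) "Date" = PySem.Dict.mk [("bet id#", "Bet ID#"), ("bet id", "Bet ID#"), ("ticket #", "Bet ID#"), ("ticket number", "Bet ID#"), ("ticket", "Bet ID#"), ("wager #", "Bet ID#"), ("wager id", "Bet ID#"), ("profit/loss", "Profit/Loss"), ("profit / loss", "Profit/Loss"), ("p/l", "Profit/Loss"), ("net", "Profit/Loss"), ("net profit", "Profit/Loss"), ("date", "Date")] := by decide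
  have s16 : (PySem.Dict.mk [("bet id#", "Bet ID#"), ("bet id", "Bet ID#"), ("ticket #", "Bet ID#"), ("ticket number", "Bet ID#"), ("ticket", "Bet ID#"), ("wager #", "Bet ID#"), ("wager id", "Bet ID#"), ("profit/loss", "Profit/Loss"), ("profit / loss", "Profit/Loss"), ("p/l", "Profit/Loss"), ("net", "Profit/Loss"), ("net profit", "Profit/Loss"), ("date", "Date")]).insert (PySem.Str.lower (pvNorm "Start Time")) "Start Time" = PySem.Dict.mk [("bet id#", "Bet ID#"), ("bet id", "Bet ID#"), ("ticket #", "Bet ID#"), ("ticket number", "Bet ID#"), ("ticket", "Bet ID#"), ("wager #", "Bet ID#"), ("wager id", "Bet ID#"), ("profit/loss", "Profit/Loss"), ("profit / loss", "Profit/Loss"), ("p/l", "Profit/Loss"), ("net", "Profit/Loss"), ("net profit", "Profit/Loss"), ("date", "Date"), ("start time", "Start Time")] := by decide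
  have s17 : (PySem.Dict.mk [("bet id#", "Bet ID#"), ("bet id", "Bet ID#"), ("ticket #", "Bet ID#"), ("ticket number", "Bet ID#"), ("ticket", "Bet ID#"), ("wager #", "Bet ID#"), ("wager id", "Bet ID#"), ("profit/loss", "Profit/Loss"), ("profit / loss", "Profit/Loss"), ("p/l", "Profit/Loss"), ("net", "Profit/Loss"), ("net profit", "Profit/Loss"), ("date", "Date"), ("start time", "Start Time")]).insert (PySem.Str.lower (pvNorm "start time")) "Start Time" = PySem.Dict.mk [("bet id#", "Bet ID#"), ("bet id", "Bet ID#"), ("ticket #", "Bet ID#"), ("ticket number", "Bet ID#"), ("ticket", "Bet ID#"), ("wager #", "Bet ID#"), ("wager id", "Bet ID#"), ("profit/loss", "Profit/Loss"), ("profit / loss", "Profit/Loss"), ("p/l", "Profit/Loss"), ("net", "Profit/Loss"), ("net profit", "Profit/Loss"), ("date", "Date"), ("start time", "Start Time")] := by decide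
  have s18 : (PySem.Dict.mk [("bet id#", "Bet ID#"), ("bet id", "Bet ID#"), ("ticket #", "Bet ID#"), ("ticket number", "Bet ID#"), ("ticket", "Bet ID#"), ("wager #", "Bet ID#"), ("wager id", "Bet ID#"), ("profit/loss", "Profit/Loss"), ("profit / loss", "Profit/Loss"), ("p/l", "Profit/Loss"), ("net", "Profit/Loss"), ("net profit", "Profit/Loss"), ("date", "Date"), ("start time", "Start Time")]).insert (PySem.Str.lower (pvNorm "time")) "Start Time" = PySem.Dict.mk [("bet id#", "Bet ID#"), ("bet id", "Bet ID#"), ("ticket #", "Bet ID#"), ("ticket number", "Bet ID#"), ("ticket", "Bet ID#"), ("wager #", "Bet ID#"), ("wager id", "Bet ID#"), ("profit/loss", "Profit/Loss"), ("profit / loss", "Profit/Loss"), ("p/l", "Profit/Loss"), ("net", "Profit/Loss"), ("net profit", "Profit/Loss"), ("date", "Date"), ("start time", "Start Time"), ("time", "Start Time")] := by decide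
  have s19 : (PySem.Dict.mk [("bet id#", "Bet ID#"), ("bet id", "Bet ID#"), ("ticket #", "Bet ID#"), ("ticket number", "Bet ID#"), ("ticket", "Bet ID#"), ("wager #", "Bet ID#"), ("wager id", "Bet ID#"), ("profit/loss", "Profit/Loss"), ("profit / loss", "Profit/Loss"), ("p/l", "Profit/Loss"), ("net", "Profit/Loss"), ("net profit", "Profit/Loss"), ("date", "Date"), ("start time", "Start Time"), ("time", "Start Time")]).insert (PySem.Str.lower (pvNorm "Event ID")) "Event ID" = PySem.Dict.mk [("bet id#", "Bet ID#"), ("bet id", "Bet ID#"), ("ticket #", "Bet ID#"), ("ticket number", "Bet ID#"), ("ticket", "Bet ID#"), ("wager #", "Bet ID#"), ("wager id", "Bet ID#"), ("profit/loss", "Profit/Loss"), ("profit / loss", "Profit/Loss"), ("p/l", "Profit/Loss"), ("net", "Profit/Loss"), ("net profit", "Profit/Loss"), ("date", "Date"), ("start time", "Start Time"), ("time", "Start Time"), ("event id", "Event ID")] := by decide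
  have s20 : (PySem.Dict.mk [("bet id#", "Bet ID#"), ("bet id", "Bet ID#"), ("ticket #", "Bet ID#"), ("ticket number", "Bet ID#"), ("ticket", "Bet ID#"), ("wager #", "Bet ID#"), ("wager id", "Bet ID#"), ("profit/loss", "Profit/Loss"), ("profit / loss", "Profit/Loss"), ("p/l", "Profit/Loss"), ("net", "Profit/Loss"), ("net profit", "Profit/Loss"), ("date", "Date"), ("start time", "Start Time"), ("time", "Start Time"), ("event id", "Event ID")]).insert (PySem.Str.lower (pvNorm "event id")) "Event ID" = PySem.Dict.mk [("bet id#", "Bet ID#"), ("bet id", "Bet ID#"), ("ticket #", "Bet ID#"), ("ticket number", "Bet ID#"), ("ticket", "Bet ID#"), ("wager #", "Bet ID#"), ("wager id", "Bet ID#"), ("profit/loss", "Profit/Loss"), ("profit / loss", "Profit/Loss"), ("p/l", "Profit/Loss"), ("net", "Profit/Loss"), ("net profit", "Profit/Loss"), ("date", "Date"), ("start time", "Start Time"), ("time", "Start Time"), ("event id", "Event ID")] := by decide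
  have s21 : (PySem.Dict.mk [("bet id#", "Bet ID#"), ("bet id", "Bet ID#"), ("ticket #", "Bet ID#"), ("ticket number", "Bet ID#"), ("ticket", "Bet ID#"), ("wager #", "Bet ID#"), ("wager id", "Bet ID#"), ("profit/loss", "Profit/Loss"), ("profit / loss", "Profit/Loss"), ("p/l", "Profit/Loss"), ("net", "Profit/Loss"), ("net profit", "Profit/Loss"), ("date", "Date"), ("start time", "Start Time"), ("time", "Start Time"), ("event id", "Event ID")]).insert (PySem.Str.lower (pvNorm "game id")) "Event ID" = PySem.Dict.mk [("bet id#", "Bet ID#"), ("bet id", "Bet ID#"), ("ticket #", "Bet ID#"), ("ticket number", "Bet ID#"), ("ticket", "Bet ID#"), ("wager #", "Bet ID#"), ("wager id", "Bet ID#"), ("profit/loss", "Profit/Loss"), ("profit / loss", "Profit/Loss"), ("p/l", "Profit/Loss"), ("net", "Profit/Loss"), ("net profit", "Profit/Loss"), ("date", "Date"), ("start time", "Start Time"), ("time", "Start Time"), ("event id", "Event ID"), ("game id", "Event ID")] := by decide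
  have s22 : (PySem.Dict.mk [("bet id#", "Bet ID#"), ("bet id", "Bet ID#"), ("ticket #", "Bet ID#"), ("ticket number", "Bet ID#"), ("ticket", "Bet ID#"), ("wager #", "Bet ID#"), ("wager id", "Bet ID#"), ("profit/loss", "Profit/Loss"), ("profit / loss", "Profit/Loss"), ("p/l", "Profit/Loss"), ("net", "Profit/Loss"), ("net profit", "Profit/Loss"), ("date", "Date"), ("start time", "Start Time"), ("time", "Start Time"), ("event id", "Event ID"), ("game id", "Event ID")]).insert (PySem.Str.lower (pvNorm "match id")) "Event ID" = PySem.Dict.mk [("bet id#", "Bet ID#"), ("bet id", "Bet ID#"), ("ticket #", "Bet ID#"), ("ticket number", "Bet ID#"), ("ticket", "Bet ID#"), ("wager #", "Bet ID#"), ("wager id", "Bet ID#"), ("profit/loss", "Profit/Loss"), ("profit / loss", "Profit/Loss"), ("p/l", "Profit/Loss"), ("net", "Profit/Loss"), ("net profit", "Profit/Loss"), ("date", "Date"), ("start time", "Start Time"), ("time", "Start Time"), ("event id", "Event ID"), ("game id", "Event ID"), ("match id", "Event ID")] := by decide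
  have s23 : (PySem.Dict.mk [("bet id#", "Bet ID#"), ("bet id", "Bet ID#"), ("ticket #", "Bet ID#"), ("ticket number", "Bet ID#"), ("ticket", "Bet ID#"), ("wager #", "Bet ID#"), ("wager id", "Bet ID#"), ("profit/loss", "Profit/Loss"), ("profit / loss", "Profit/Loss"), ("p/l", "Profit/Loss"), ("net", "Profit/Loss"), ("net profit", "Profit/Loss"), ("date", "Date"), ("start time", "Start Time"), ("time", "Start Time"), ("event id", "Event ID"), ("game id", "Event ID"), ("match id", "Event ID")]).insert (PySem.Str.lower (pvNorm "Result")) "Result" = PySem.Dict.mk [("bet id#", "Bet ID#"), ("bet id", "Bet ID#"), ("ticket #", "Bet ID#"), ("ticket number", "Bet ID#"), ("ticket", "Bet ID#"), ("wager #", "Bet ID#"), ("wager id", "Bet ID#"), ("profit/loss", "Profit/Loss"), ("profit / loss", "Profit/Loss"), ("p/l", "Profit/Loss"), ("net", "Profit/Loss"), ("net profit", "Profit/Loss"), ("date", "Date"), ("start time", "Start Time"), ("time", "Start Time"), ("event id", "Event ID"), ("game id", "Event ID"), ("match id", "Event ID"), ("result", "Result")] := by decide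
  have s24 : (PySem.Dict.mk [("bet id#", "Bet ID#"), ("bet id", "Bet ID#"), ("ticket #", "Bet ID#"), ("ticket number", "Bet ID#"), ("ticket", "Bet ID#"), ("wager #", "Bet ID#"), ("wager id", "Bet ID#"), ("profit/loss", "Profit/Loss"), ("profit / loss", "Profit/Loss"), ("p/l", "Profit/Loss"), ("net", "Profit/Loss"), ("net profit", "Profit/Loss"), ("date", "Date"), ("start time", "Start Time"), ("time", "Start Time"), ("event id", "Event ID"), ("game id", "Event ID"), ("match id", "Event ID"), ("result", "Result")]).insert (PySem.Str.lower (pvNorm "result")) "Result" = PySem.Dict.mk [("bet id#", "Bet ID#"), ("bet id", "Bet ID#"), ("ticket #", "Bet ID#"), ("ticket number", "Bet ID#"), ("ticket", "Bet ID#"), ("wager #", "Bet ID#"), ("wager id", "Bet ID#"), ("profit/loss", "Profit/Loss"), ("profit / loss", "Profit/Loss"), ("p/l", "Profit/Loss"), ("net", "Profit/Loss"), ("net profit", "Profit/Loss"), ("date", "Date"), ("start time", "Start Time"), ("time", "Start Time"), ("event id", "Event ID"), ("game id", "Event ID"), ("match id", "Event ID"), ("result", "Result")] := by decide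
  have s25 : (PySem.Dict.mk [("bet id#", "Bet ID#"), ("bet id", "Bet ID#"), ("ticket #", "Bet ID#"), ("ticket number", "Bet ID#"), ("ticket", "Bet ID#"), ("wager #", "Bet ID#"), ("wager id", "Bet ID#"), ("profit/loss", "Profit/Loss"), ("profit / loss", "Profit/Loss"), ("p/l", "Profit/Loss"), ("net", "Profit/Loss"), ("net profit", "Profit/Loss"), ("date", "Date"), ("start time", "Start Time"), ("time", "Start Time"), ("event id", "Event ID"), ("game id", "Event ID"), ("match id", "Event ID"), ("result", "Result")]).insert (PySem.Str.lower (pvNorm "status")) "Result" = PySem.Dict.mk [("bet id#", "Bet ID#"), ("bet id", "Bet ID#"), ("ticket #", "Bet ID#"), ("ticket number", "Bet ID#"), ("ticket", "Bet ID#"), ("wager #", "Bet ID#"), ("wager id", "Bet ID#"), ("profit/loss", "Profit/Loss"), ("profit / loss", "Profit/Loss"), ("p/l", "Profit/Loss"), ("net", "Profit/Loss"), ("net profit", "Profit/Loss"), ("date", "Date"), ("start time", "Start Time"), ("time", "Start Time"), ("event id", "Event ID"), ("game id", "Event ID"), ("match id", "Event ID"), ("result", "Result"), ("status", "Result")] :=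 by decide
  have s26 : (PySem.Dict.mk [("bet id#", "Bet ID#"), ("bet id", "Bet ID#"), ("ticket #", "Bet ID#"), ("ticket number", "Bet ID#"), ("ticket", "Bet ID#"), ("wager #", "Bet ID#"), ("wager id", "Bet ID#"), ("profit/loss", "Profit/Loss"), ("profit / loss", "Profit/Loss"), ("p/l", "Profit/Loss"), ("net", "Profit/Loss"), ("net profit", "Profit/Loss"), ("date", "Date"), ("start time", "Start Time"), ("time", "Start Time"), ("event id", "Event ID"), ("game id", "Event ID"), ("match id", "Event ID"), ("result", "Result"), ("status", "Result")]).insert (PySem.Str.lower (pvNorm "outcome")) "Result" = PySem.Dict.mk [("bet id#", "Bet ID#"), ("bet id", "Bet ID#"), ("ticket #", "Bet ID#"), ("ticket number", "Bet ID#"), ("ticket", "Bet ID#"), ("wager #", "Bet ID#"), ("wager id", "Bet ID#"), ("profit/loss", "Profit/Loss"), ("profit / loss", "Profit/Loss"), ("p/l", "Profit/Loss"), ("net", "Profit/Loss"), ("net profit", "Profit/Loss"), ("date", "Date"), ("start time", "Start Time"), ("time", "Start Time"), ("event id", "Event ID"), ("game id", "Event ID"), ("match id", "Event ID"), ("result",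 "Result"), ("status", "Result"), ("outcome", "Result")] := by decide
  simp only [pvAliases, List.foldl, s0, s1, s2, s3, s4, s5, s6, s7, s8, s9, s10, s11, s12, s13, s14, s15, s16, s17, s18, s19, s20, s21, s22, s23, s24, s25, s26]
  rfl


set_option maxHeartbeats 2000000 in
theorem pvElem_eq (key fb : String) :
    pvRev.getD key fb = pvFindCanon key fb pvAliases := by
  by_cases h0 : key = "bet id#"
  · subst h0; rfl
  by_cases h1 : key = "bet id"
  · subst h1; rfl
  by_cases h2 : key = "ticket #"
  · subst h2; rfl
  by_cases h3 : key = "ticket number"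
  · subst h3; rfl
  by_cases h4 : key = "ticket"
  · subst h4; rfl
  by_cases h5 : key = "wager #"
  · subst h5; rfl
  by_cases h6 : key = "wager id"
  · subst h6; rfl
  by_cases h7 : key = "profit/loss"
  · subst h7; rfl
  by_cases h8 : key = "profit / loss"
  · subst h8; rfl
  by_cases h9 : key = "p/l"
  · subst h9; rfl
  by_cases h10 : key = "net"
  · subst h10; rfl
  by_cases h11 : key = "net profit"
  · subst h11; rfl
  by_cases h12 : key = "date"
  · subst h12; rfl
  by_cases h13 : key = "start time"
  · subst h13; rfl
  by_cases h14 : key = "time"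
  · subst h14; rfl
  by_cases h15 : key = "event id"
  · subst h15; rfl
  by_cases h16 : key = "game id"
  · subst h16; rfl
  by_cases h17 : key = "match id"
  · subst h17; rfl
  by_cases h18 : key = "result"
  · subst h18; rfl
  by_cases h19 : key = "status"
  · subst h19; rfl
  by_cases h20 : key = "outcome"
  · subst h20; rfl
  have e0 : PySem.Str.lower (pvNorm "Bet ID#") = "bet id#" := by decide
  have e1 : PySem.Str.lower (pvNorm "Profit/Loss") = "profit/loss" := by decide
  have e2 : PySem.Str.lower (pvNorm "Date") = "date" := by decide
  have e3 : PySem.Str.lower (pvNorm "Start Time") = "start time" := by decide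
  have e4 : PySem.Str.lower (pvNorm "Event ID") = "event id" := by decide
  have e5 : PySem.Str.lower (pvNorm "Result") = "result" := by decide
  have e6 : PySem.Str.lower (pvNorm "bet id#") = "bet id#" := by decide
  have e7 : PySem.Str.lower (pvNorm "bet id") = "bet id" := by decide
  have e8 : PySem.Str.lower (pvNorm "ticket #") = "ticket #" := by decide
  have e9 : PySem.Str.lower (pvNorm "ticket number") = "ticket number" := by decide
  have e10 : PySem.Str.lower (pvNorm "ticket") = "ticket" := by decide
  have e11 : PySem.Str.lower (pvNorm "wager #") = "wager #" := by decide
  have e12 : PySem.Str.lower (pvNorm "wager id") = "wager id" := by decide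
  have e13 : PySem.Str.lower (pvNorm "profit/loss") = "profit/loss" := by decide
  have e14 : PySem.Str.lower (pvNorm "profit / loss") = "profit / loss" := by decide
  have e15 : PySem.Str.lower (pvNorm "p/l") = "p/l" := by decide
  have e16 : PySem.Str.lower (pvNorm "net") = "net" := by decide
  have e17 : PySem.Str.lower (pvNorm "net profit") = "net profit" := by decide
  have e18 : PySem.Str.lower (pvNorm "date") = "date" := by decide
  have e19 : PySem.Str.lower (pvNorm "start time") = "start time" := by decide
  have e20 : PySem.Str.lower (pvNorm "time") = "time" := by decide
  have e21 : PySem.Str.lower (pvNorm "event id") = "event id" := by decide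
  have e22 : PySem.Str.lower (pvNorm "game id") = "game id" := by decide
  have e23 : PySem.Str.lower (pvNorm "match id") = "match id" := by decide
  have e24 : PySem.Str.lower (pvNorm "result") = "result" := by decide
  have e25 : PySem.Str.lower (pvNorm "status") = "status" := by decide
  have e26 : PySem.Str.lower (pvNorm "outcome") = "outcome" := by decide
  simp [pvRev, pvFindCanon, pvAliases, PySem.Dict.getD_eq_get?_getD, e0, e1, e2, e3, e4, e5, e6, e7, e8, e9, e10, e11, e12, e13, e14, e15, e16, e17, e18, e19, e20, e21, e22, e23, e24, e25, e26, Ne.symm h0, Ne.symm h1, Ne.symm h2, Ne.symm h3, Ne.symm h4, Ne.symm h5, Ne.symm h6, Ne.symm h7, Ne.symm h8, Ne.symm h9, Ne.symm h10, Ne.symm h11, Ne.symm h12, Ne.symm h13, Ne.symm h14, Ne.symm h15, Ne.symm h16, Ne.symm h17, Ne.symm h18, Ne.symm h19, Ne.symm h20, h0, h1, h2, h3, h4, h5, h6, h7, h8, h9, h10, h11, h12, h13, h14, h15, h16, h17, h18, h19, h20, PySem.Dict.get?]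

set_option maxHeartbeats 1000000 in
theorem canonicalize_header_list_spec' (header_row : List String) :
    canonicalize_header_list header_row = canonicalize_header_list_alt header_row := by
  unfold canonicalize_header_list canonicalize_header_list_alt
  rw [pvRev_eq]
  rw [PySem.List.foldl_append_singleton_eq_map]
  apply List.map_congr_left
  intro h _
  exact pvElem_eq _ _

-- ===== VERDICT (by name: the statement is the Claim_ definition above) =====
theorem canonicalize_header_list_spec : Claim_equal_canonicalize_header_list := by
  intro header_row _
  exact canonicalize_header_list_spec' header_row
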